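-- pv_equiv track=rewrite | github.com/wuzengding/TRANSAID | Analyze_prediction3.py | format_text_for_excel
-- ===== SOURCE A (Python) =====
-- def format_text_for_excel(html_text, keep_position=False):
--     """
--     Format HTML text for Excel while optionally preserving position numbers
--
--     Args:
--         html_text (str): HTML formatted text
--         keep_position (bool): Whether to keep position numbers
--
--     Returns:
--         str: Formatted text for Excel
--     """
--     if not html_text:
--         return ""
--
--     result = ""
--     i = 0
--     while i < len(html_text):
--         if html_text[i:i+5] == '<span':
--             # Skip span tag
--             i = html_text.find('>', i) + 1
--         elif html_text[i:i+7] == '</span>':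
--             # Skip closing span tag
--             i += 7
--         elif html_text[i:i+5] == '<sub>':
--             if keep_position:
--                 # Keep position number with underscore prefix
--                 sub_end = html_text.find('</sub>', i)
--                 position = html_text[i+5:sub_end]
--                 result += position
--             i = html_text.find('</sub>', i) + 6
--         else:
--             result += html_text[i]
--             i += 1
--
--     return result
-- ===== SOURCE B (Python) =====
-- def format_text_for_excel(html_text, keep_position=False):
--     """Chunk scanner: jump to each '<' with partition and emit whole text
--     chunks, instead of per-character index stepping."""
--     out = []
--     rest = html_text
--     while True:
--         head, sep, tail = rest.partition('<')
--         out.append(head)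
--         if not sep:
--             break
--         if tail.startswith('span'):
--             _, _, rest = tail.partition('>')
--         elif tail.startswith('/span>'):
--             rest = tail[6:]
--         elif tail.startswith('sub>'):
--             content, _, rest = tail[4:].partition('</sub>')
--             if keep_position:
--                 out.append(content)
--         else:
--             out.append('<')
--             rest = tail
--     return ''.join(out)
-- ===== Notes on version B (the rewrite author's own statement) =====
-- stated objective: alternative
-- what changed: Replaces A's per-character index scanner (a 5/7-char slice comparison at every position, with find() for jumps) by a partition-based chunk scanner that jumps straight to each '<', emits whole text chunks at once, and dispatches on the tag name that follows.
-- outside the precondition, e.g. on format_text_for_excel('<sub>ab', True): A returns 'aab', B returns 'ab'; on format_text_for_excel('ab<sub>y', False): A returns 'abb>y', B returns 'ab'; on format_text_for_excel('<span x', False): A does not finish within the time limit, B returns ''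
import Mathlib
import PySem

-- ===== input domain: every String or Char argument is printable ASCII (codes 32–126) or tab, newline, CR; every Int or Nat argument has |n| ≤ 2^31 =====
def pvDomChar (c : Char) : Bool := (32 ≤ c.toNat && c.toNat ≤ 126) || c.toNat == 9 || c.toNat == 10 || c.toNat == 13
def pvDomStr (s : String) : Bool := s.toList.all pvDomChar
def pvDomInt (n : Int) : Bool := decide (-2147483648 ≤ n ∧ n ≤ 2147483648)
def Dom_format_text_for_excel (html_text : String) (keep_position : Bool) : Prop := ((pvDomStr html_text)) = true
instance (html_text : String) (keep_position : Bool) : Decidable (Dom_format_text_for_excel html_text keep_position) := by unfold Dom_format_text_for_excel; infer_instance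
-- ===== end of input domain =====

-- B replaces A's per-character index scanner with a partition-based chunk scanner
-- (jump to each '<', emit whole text chunks, dispatch on the tag that follows);
-- same cost, different traversal (objective: alternative).


-- ===== PORT A =====
-- the while-loop of A: state = (fuel, index i, result); fuel = len+1 suffices inside
-- Pre_ (there the index strictly increases each iteration).  html_text[i] is ported
-- with pyGet? (always in range at reachable states: 0 ≤ i < len in that branch).
def pvALoop (L : List Char) (keep : Bool) : Nat → Int → List Char → List Char
  | 0, _, res => res
  | fuel+1, i, res =>
    if i < (L.length : Int) then
      if PySem.List.slice L (some i) (some (i+5)) = ['<','s','p','a','n'] then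
        pvALoop L keep fuel (PySem.Chars.findFrom L ['>'] i + 1) res
      else if PySem.List.slice L (some i) (some (i+7)) = ['<','/','s','p','a','n','>'] then
        pvALoop L keep fuel (i+7) res
      else if PySem.List.slice L (some i) (some (i+5)) = ['<','s','u','b','>'] then
        let subEnd := PySem.Chars.findFrom L ['<','/','s','u','b','>'] i
        let res' := if keep then res ++ PySem.List.slice L (some (i+5)) (some subEnd) else res
        pvALoop L keep fuel (subEnd + 6) res'
      else
        pvALoop L keep fuel (i+1) (res ++ (PySem.List.pyGet? L i).toList)
    else res

def format_text_for_excel (html_text : String) (keep_position : Bool) : String :=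
  if html_text.toList = [] then ""
  else String.ofList (pvALoop html_text.toList keep_position (html_text.toList.length + 1) 0 [])

-- ===== PORT B =====
-- rest.partition(c) for a one-char separator: (before, found?, after)
def pvPartChar (c : Char) : List Char → List Char × Bool × List Char
  | [] => ([], false, [])
  | x :: xs =>
    if x = c then ([], true, xs)
    else
      let r := pvPartChar c xs
      (x :: r.1, r.2.1, r.2.2)

-- s.partition(pat), keeping only (before, after); pat not found gives (s, [])
def pvPartPat (pat : List Char) : List Char → List Char × List Char
  | [] => ([], [])
  | x :: xs =>
    if pat.isPrefixOf (x :: xs) then ([], (x :: xs).drop pat.length)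
    else
      let r := pvPartPat pat xs
      (x :: r.1, r.2)

-- termination facts for pvBLoop (cited by name in decreasing_by)
theorem pvPartChar_rest_le (c : Char) (l : List Char) : (pvPartChar c l).2.2.length ≤ l.length := by
  induction l with
  | nil => simp [pvPartChar]
  | cons x xs ih =>
    by_cases h : x = c <;> simp [pvPartChar, h] <;> omega

theorem pvPartChar_found_lt (c : Char) (l : List Char) (h : (pvPartChar c l).2.1 = true) :
    (pvPartChar c l).2.2.length < l.length := by
  induction l with
  | nil => simp [pvPartChar] at h
  | cons x xs ih =>
    by_cases hx : x = c
    · simp [pvPartChar, hx]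
    · simp [pvPartChar, hx] at h ⊢
      exact Nat.le_of_lt (ih h)

theorem pvPartPat_rest_le (pat : List Char) (l : List Char) : (pvPartPat pat l).2.length ≤ l.length := by
  induction l with
  | nil => simp [pvPartPat]
  | cons x xs ih =>
    by_cases h : pat.isPrefixOf (x :: xs) <;> simp [pvPartPat, h, List.length_drop] <;> omega

-- the while-loop of B: partition at the next '<', emit the chunk, dispatch on the tag
def pvBLoop (keep : Bool) (rest : List Char) : List Char :=
  let t := pvPartChar '<' rest
  t.1 ++
    (if h : t.2.1 = true then
      (if PySem.Chars.startswith t.2.2 ['s','p','a','n'] then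
        pvBLoop keep (pvPartChar '>' t.2.2).2.2
      else if PySem.Chars.startswith t.2.2 ['/','s','p','a','n','>'] then
        pvBLoop keep (t.2.2.drop 6)
      else if PySem.Chars.startswith t.2.2 ['s','u','b','>'] then
        let r := pvPartPat ['<','/','s','u','b','>'] (t.2.2.drop 4)
        (if keep then r.1 else []) ++ pvBLoop keep r.2
      else '<' :: pvBLoop keep t.2.2)
    else [])
termination_by rest.length
decreasing_by
  · have h1 := pvPartChar_rest_le '>' (pvPartChar '<' rest).2.2
    have h2 := pvPartChar_found_lt '<' rest h
    omega
  · have h2 := pvPartChar_found_lt '<' rest h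
    rw [List.length_drop]; omega
  · have h3 := pvPartPat_rest_le ['<','/','s','u','b','>'] ((pvPartChar '<' rest).2.2.drop 4)
    rw [List.length_drop] at h3
    have h2 := pvPartChar_found_lt '<' rest h
    omega
  · exact pvPartChar_found_lt '<' rest h

def format_text_for_excel_alt (html_text : String) (keep_position : Bool) : String :=
  String.ofList (pvBLoop keep_position html_text.toList)

-- ===== PRECONDITION & SPEC =====
-- Pre_ excludes strings in which some occurrence of '<span' has no later '>' or some
-- occurrence of '<sub>' has no later '</sub>': on those A either loops forever or
-- returns an accidental splice (find()'s -1 fed into slice/index arithmetic).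
def Pre_format_text_for_excel (html_text : String) (keep_position : Bool) : Prop :=
  ∀ i < html_text.toList.length,
    (List.isPrefixOf ['<','s','p','a','n'] (html_text.toList.drop i) = true →
      '>' ∈ html_text.toList.drop i) ∧
    (List.isPrefixOf ['<','s','u','b','>'] (html_text.toList.drop i) = true →
      PySem.Chars.isIn ['<','/','s','u','b','>'] (html_text.toList.drop i) = true)
instance (html_text : String) (keep_position : Bool) : Decidable (Pre_format_text_for_excel html_text keep_position) := by unfold Pre_format_text_for_excel; infer_instance

def pvWitness_format_text_for_excel : String × Bool := ("<sub>7</sub>", true)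

def Spec_format_text_for_excel (html_text : String) (keep_position : Bool) (out : String) : Prop := out = format_text_for_excel_alt html_text keep_position
instance (html_text : String) (keep_position : Bool) (out : String) : Decidable (Spec_format_text_for_excel html_text keep_position out) := by unfold Spec_format_text_for_excel; infer_instance

-- ===== CLAIM (what is proved, stated in full; the proofs are below) =====
def Claim_equal_format_text_for_excel : Prop := ∀ (html_text : String) (keep_position : Bool), Dom_format_text_for_excel html_text keep_position → Pre_format_text_for_excel html_text keep_position → Spec_format_text_for_excel html_text keep_position (format_text_for_excel html_text keep_position)

-- ===== LEMMAS AND PROOFS =====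

-- [c] is a prefix of L.drop m  ↔  L[m]? = some c
theorem pv_single_prefix_drop (c : Char) (L : List Char) (m : Nat) :
    [c] <+: L.drop m ↔ L[m]? = some c := by
  constructor
  · rintro ⟨t, ht⟩
    have h0 : (L.drop m)[0]? = some c := by rw [← ht]; rfl
    rw [List.getElem?_drop] at h0
    simpa using h0
  · intro h
    have hm : m < L.length := by
      by_contra hh
      rw [List.getElem?_eq_none (Nat.le_of_not_lt hh)] at h
      cases h
    have hc : L[m] = c := by
      rw [List.getElem?_eq_getElem hm] at h
      exact Option.some.inj h
    refine ⟨L.drop (m+1), ?_⟩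
    rw [List.drop_eq_getElem_cons hm, hc]
    rfl

-- a prefix of L.drop m pins down the elements of L
theorem pv_prefix_drop_get (p L : List Char) (m d : Nat) (h : p <+: L.drop m)
    (hd : d < p.length) : L[m + d]? = some p[d] := by
  obtain ⟨t, ht⟩ := h
  have h0 : (L.drop m)[d]? = some p[d] := by rw [← ht]; simp [List.getElem?_append, hd]
  rw [List.getElem?_drop] at h0
  exact h0

theorem pvPartChar_of_first (c : Char) (l : List Char) (k : Nat)
    (hk : l[k]? = some c) (hmin : ∀ m < k, l[m]? ≠ some c) :
    pvPartChar c l = (l.take k, true, l.drop (k+1)) := by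
  induction l generalizing k with
  | nil => simp at hk
  | cons x xs ih =>
    cases k with
    | zero =>
      have hx : x = c := by simpa using hk
      simp [pvPartChar, hx]
    | succ k =>
      have hx : ¬ x = c := by
        intro hx
        exact hmin 0 (Nat.succ_pos k) (by simp [hx])
      have hk' : xs[k]? = some c := by simpa using hk
      have hmin' : ∀ m < k, xs[m]? ≠ some c := by
        intro m hm
        have := hmin (m+1) (by omega)
        simpa using this
      simp [pvPartChar, hx, ih k hk' hmin']

theorem pvPartPat_of_first (p l : List Char) (k : Nat) (hne : p ≠ [])
    (hk : p <+: l.drop k) (hmin : ∀ m < k, ¬ p <+: l.drop m) :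
    pvPartPat p l = (l.take k, l.drop (k + p.length)) := by
  induction l generalizing k with
  | nil =>
    have : p = [] := by simpa using List.prefix_nil.mp (by simpa using hk)
    exact absurd this hne
  | cons x xs ih =>
    cases k with
    | zero =>
      have hp : p.isPrefixOf (x :: xs) = true := List.isPrefixOf_iff_prefix.mpr (by simpa using hk)
      simp [pvPartPat, hp]
    | succ k =>
      have hp : ¬ p.isPrefixOf (x :: xs) = true := by
        intro hp
        exact hmin 0 (Nat.succ_pos k) (by simpa using List.isPrefixOf_iff_prefix.mp hp)
      have hk' : p <+: xs.drop k := by simpa using hk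
      have hmin' : ∀ m < k, ¬ p <+: xs.drop m := by
        intro m hm
        have := hmin (m+1) (by omega)
        simpa using this
      rw [show k + 1 + p.length = (k + p.length) + 1 by ring]
      simp [pvPartPat, hp, ih k hk' hmin']

theorem pvBLoop_nil (keep : Bool) : pvBLoop keep [] = [] := by
  rw [pvBLoop]; simp [pvPartChar]

theorem pvBLoop_cons_ne (keep : Bool) (c : Char) (u : List Char) (h : ¬ c = '<') :
    pvBLoop keep (c :: u) = c :: pvBLoop keep u := by
  conv_lhs => rw [pvBLoop]
  conv_rhs => rw [pvBLoop]
  simp [pvPartChar, h]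

theorem pvBLoop_lt_cons (keep : Bool) (u : List Char) :
    pvBLoop keep ('<' :: u) =
      (if PySem.Chars.startswith u ['s','p','a','n'] then
        pvBLoop keep (pvPartChar '>' u).2.2
      else if PySem.Chars.startswith u ['/','s','p','a','n','>'] then
        pvBLoop keep (u.drop 6)
      else if PySem.Chars.startswith u ['s','u','b','>'] then
        (if keep then (pvPartPat ['<','/','s','u','b','>'] (u.drop 4)).1 else []) ++
          pvBLoop keep (pvPartPat ['<','/','s','u','b','>'] (u.drop 4)).2
      else '<' :: pvBLoop keep u) := by
  conv_lhs => rw [pvBLoop]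
  simp [pvPartChar]

-- A's slice test at i recognises exactly "tok is a prefix of L.drop i"
theorem pv_slice_tok (L : List Char) (i : Nat) (tok : List Char) :
    PySem.List.slice L (some (i : Int)) (some ((i : Int) + tok.length)) = tok ↔
      tok <+: L.drop i := by
  have hcast : (i : Int) + tok.length = ((i + tok.length : Nat) : Int) := by push_cast; ring
  rw [hcast, PySem.List.slice_natCast, Nat.add_sub_cancel_left, List.prefix_iff_eq_take]
  exact eq_comm

-- a '<'-headed token fails startswith on the tail iff it fails as a prefix of the drop
theorem pv_not_sw (tok L : List Char) (i : Nat) (hdropi : L.drop i = '<' :: L.drop (i+1))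
    (hno : ¬ ('<' :: tok) <+: L.drop i) :
    ¬ PySem.Chars.startswith (L.drop (i+1)) tok = true := by
  intro hh
  exact hno (by rw [hdropi]; exact List.cons_prefix_cons.mpr ⟨rfl, (PySem.Chars.startswith_iff _ _).mp hh⟩)

-- main loop correspondence: inside Pre_, A's loop from index i produces B's output on L.drop i
theorem pv_main (L : List Char) (keep : Bool)
    (hwf : ∀ i < L.length,
      (List.isPrefixOf ['<','s','p','a','n'] (L.drop i) = true → '>' ∈ L.drop i) ∧
      (List.isPrefixOf ['<','s','u','b','>'] (L.drop i) = true →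
        PySem.Chars.isIn ['<','/','s','u','b','>'] (L.drop i) = true)) :
    ∀ (fuel : Nat) (i : Nat) (res : List Char), L.length - i < fuel →
      pvALoop L keep fuel (i : Int) res = res ++ pvBLoop keep (L.drop i) := by
  intro fuel
  induction fuel with
  | zero => intro i res h; omega
  | succ fuel ih =>
    intro i res hfuel
    by_cases hi : i < L.length
    · have hiI : (i : Int) < (L.length : Int) := by exact_mod_cast hi
      have tspan := pv_slice_tok L i ['<','s','p','a','n']
      have tcspan := pv_slice_tok L i ['<','/','s','p','a','n','>']
      have tsub := pv_slice_tok L i ['<','s','u','b','>']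
      norm_num at tspan tcspan tsub
      simp only [pvALoop, if_pos hiI]
      by_cases hs : ['<','s','p','a','n'] <+: L.drop i
      · -- '<span' branch
        rw [if_pos (tspan.mpr hs)]
        have hgt : '>' ∈ L.drop i := (hwf i hi).1 (List.isPrefixOf_iff_prefix.mpr hs)
        have hinf : ['>'] <:+: L.drop i := by
          obtain ⟨s1, t1, hst⟩ := List.append_of_mem hgt
          exact ⟨s1, t1, by rw [hst]; simp⟩
        have hne : PySem.Chars.findFrom L ['>'] (i : Int) ≠ -1 := by
          intro hE
          rw [PySem.Chars.findFrom_natCast_eq_neg_one_iff L ['>'] i hi.le] at hE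
          exact hE hinf
        obtain ⟨hif, hpre2, hminp⟩ := PySem.Chars.findFrom_natCast_spec L ['>'] i hi.le hne
        set f := PySem.Chars.findFrom L ['>'] (i : Int) with hf
        set j := f.toNat with hj
        have hfj : f = (j : Int) := by
          rw [hj]
          exact (Int.toNat_of_nonneg (le_trans (by exact_mod_cast Nat.zero_le i) hif)).symm
        have hLj : L[j]? = some '>' := (pv_single_prefix_drop _ _ _).mp hpre2
        have hLi : L[i]? = some '<' := by simpa using pv_prefix_drop_get _ L i 0 hs (by norm_num)
        have hijle : i ≤ j := by
          have : (i : Int) ≤ (j : Int) := hfj ▸ hif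
          exact_mod_cast this
        have hij : i < j := by
          rcases Nat.lt_or_ge i j with h' | h'
          · exact h'
          · exfalso
            have hji : j = i := by omega
            rw [hji, hLi] at hLj
            exact absurd (Option.some.inj hLj) (by decide)
        have hLigt : L[i] = '<' := by
          rw [List.getElem?_eq_getElem hi] at hLi
          exact Option.some.inj hLi
        have hdropi : L.drop i = '<' :: L.drop (i+1) := by
          rw [List.drop_eq_getElem_cons hi, hLigt]
        rw [hdropi, pvBLoop_lt_cons]
        have hsp4 : PySem.Chars.startswith (L.drop (i+1)) ['s','p','a','n'] = true := by
          rw [PySem.Chars.startswith_iff]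
          have h' := hs
          rw [hdropi] at h'
          exact (List.cons_prefix_cons.mp h').2
        rw [if_pos hsp4]
        have hpc : pvPartChar '>' (L.drop (i+1)) =
            ((L.drop (i+1)).take (j-(i+1)), true, (L.drop (i+1)).drop (j-(i+1)+1)) := by
          apply pvPartChar_of_first
          · rw [List.getElem?_drop, show i+1+(j-(i+1)) = j by omega]
            exact hLj
          · intro m hm
            rw [List.getElem?_drop]
            have hnp := hminp (i+1+m) (by omega) (by omega)
            rw [pv_single_prefix_drop] at hnp
            exact hnp
        rw [hpc]
        have hdd : (L.drop (i+1)).drop (j-(i+1)+1) = L.drop (j+1) := by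
          rw [List.drop_drop]; congr 1; omega
        have hcast : f + 1 = ((j+1 : Nat) : Int) := by rw [hfj]; push_cast; ring
        rw [hcast, ih (j+1) res (by omega)]
        dsimp only
        rw [hdd]
      · rw [if_neg (fun hh => hs (tspan.mp hh))]
        by_cases hcs : ['<','/','s','p','a','n','>'] <+: L.drop i
        · -- '</span>' branch
          rw [if_pos (tcspan.mpr hcs)]
          have hLi : L[i]? = some '<' := by simpa using pv_prefix_drop_get _ L i 0 hcs (by norm_num)
          have hLigt : L[i] = '<' := by
            rw [List.getElem?_eq_getElem hi] at hLi
            exact Option.some.inj hLi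
          have hdropi : L.drop i = '<' :: L.drop (i+1) := by
            rw [List.drop_eq_getElem_cons hi, hLigt]
          rw [hdropi, pvBLoop_lt_cons]
          have hnsp : ¬ PySem.Chars.startswith (L.drop (i+1)) ['s','p','a','n'] = true :=
            pv_not_sw ['s','p','a','n'] L i hdropi hs
          rw [if_neg hnsp]
          have hcsp : PySem.Chars.startswith (L.drop (i+1)) ['/','s','p','a','n','>'] = true := by
            rw [PySem.Chars.startswith_iff]
            have h' := hcs
            rw [hdropi] at h'
            exact (List.cons_prefix_cons.mp h').2
          rw [if_pos hcsp]
          have hdd : (L.drop (i+1)).drop 6 = L.drop (i+7) := by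
            rw [List.drop_drop]
          have hcast : (i : Int) + 7 = ((i+7 : Nat) : Int) := by push_cast; ring
          rw [hcast, ih (i+7) res (by omega), hdd]
        · rw [if_neg (fun hh => hcs (tcspan.mp hh))]
          by_cases hsb : ['<','s','u','b','>'] <+: L.drop i
          · -- '<sub>' branch
            rw [if_pos (tsub.mpr hsb)]
            have hin : PySem.Chars.isIn ['<','/','s','u','b','>'] (L.drop i) = true :=
              (hwf i hi).2 (List.isPrefixOf_iff_prefix.mpr hsb)
            have hinf : ['<','/','s','u','b','>'] <:+: L.drop i :=
              (PySem.Chars.isIn_iff_infix _ _).mp hin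
            have hne : PySem.Chars.findFrom L ['<','/','s','u','b','>'] (i : Int) ≠ -1 := by
              intro hE
              rw [PySem.Chars.findFrom_natCast_eq_neg_one_iff L _ i hi.le] at hE
              exact hE hinf
            obtain ⟨hif, hpre2, hminp⟩ := PySem.Chars.findFrom_natCast_spec L ['<','/','s','u','b','>'] i hi.le hne
            set f := PySem.Chars.findFrom L ['<','/','s','u','b','>'] (i : Int) with hf
            set j := f.toNat with hj
            have hfj : f = (j : Int) := by
              rw [hj]
              exact (Int.toNat_of_nonneg (le_trans (by exact_mod_cast Nat.zero_le i) hif)).symm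
            have hijle : i ≤ j := by
              have : (i : Int) ≤ (j : Int) := hfj ▸ hif
              exact_mod_cast this
            -- characters pinned by the two prefixes
            have e0 : L[i + 0]? = some '<' := pv_prefix_drop_get _ L i 0 hsb (by norm_num)
            have f0' : L[j + 0]? = some '<' := pv_prefix_drop_get _ L j 0 hpre2 (by norm_num)
            have e1 : L[i + 1]? = some 's' := pv_prefix_drop_get _ L i 1 hsb (by norm_num)
            have e2 : L[i + 2]? = some 'u' := pv_prefix_drop_get _ L i 2 hsb (by norm_num)
            have e3 : L[i + 3]? = some 'b' := pv_prefix_drop_get _ L i 3 hsb (by norm_num)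
            have e4 : L[i + 4]? = some '>' := pv_prefix_drop_get _ L i 4 hsb (by norm_num)
            have f1 : L[j + 1]? = some '/' := pv_prefix_drop_get _ L j 1 hpre2 (by norm_num)
            simp only [Nat.add_zero] at e0 f0'
            have h5 : i + 5 ≤ j := by
              by_contra hh
              have hcases : j = i ∨ j = i+1 ∨ j = i+2 ∨ j = i+3 ∨ j = i+4 := by omega
              rcases hcases with h' | h' | h' | h' | h'
              · rw [h'] at f1
                rw [e1] at f1
                exact absurd (Option.some.inj f1) (by decide)
              · rw [h'] at f0'
                rw [e1] at f0'
                exact absurd (Option.some.inj f0') (by decide)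
              · rw [h'] at f0'
                rw [e2] at f0'
                exact absurd (Option.some.inj f0') (by decide)
              · rw [h'] at f0'
                rw [e3] at f0'
                exact absurd (Option.some.inj f0') (by decide)
              · rw [h'] at f0'
                rw [e4] at f0'
                exact absurd (Option.some.inj f0') (by decide)
            have hLigt : L[i] = '<' := by
              rw [List.getElem?_eq_getElem hi] at e0
              exact Option.some.inj e0
            have hdropi : L.drop i = '<' :: L.drop (i+1) := by
              rw [List.drop_eq_getElem_cons hi, hLigt]
            rw [hdropi, pvBLoop_lt_cons]
            have hnsp : ¬ PySem.Chars.startswith (L.drop (i+1)) ['s','p','a','n'] = true :=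
              pv_not_sw ['s','p','a','n'] L i hdropi hs
            have hncsp : ¬ PySem.Chars.startswith (L.drop (i+1)) ['/','s','p','a','n','>'] = true :=
              pv_not_sw ['/','s','p','a','n','>'] L i hdropi hcs
            have hsb4 : PySem.Chars.startswith (L.drop (i+1)) ['s','u','b','>'] = true := by
              rw [PySem.Chars.startswith_iff]
              have h' := hsb
              rw [hdropi] at h'
              exact (List.cons_prefix_cons.mp h').2
            rw [if_neg hnsp, if_neg hncsp, if_pos hsb4]
            have hdd4 : (L.drop (i+1)).drop 4 = L.drop (i+5) := by
              rw [List.drop_drop]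
            have hpp : pvPartPat ['<','/','s','u','b','>'] (L.drop (i+5)) =
                ((L.drop (i+5)).take (j-(i+5)), (L.drop (i+5)).drop (j-(i+5)+6)) := by
              apply pvPartPat_of_first _ _ _ (by decide)
              · rw [List.drop_drop, show i+5+(j-(i+5)) = j by omega]
                exact hpre2
              · intro m hm
                rw [List.drop_drop]
                exact hminp (i+5+m) (by omega) (by omega)
            have hcast5 : (i : Int) + 5 = ((i+5 : Nat) : Int) := by push_cast; ring
            have hslice : PySem.List.slice L (some ((i : Int)+5)) (some f) =
                (L.drop (i+5)).take (j-(i+5)) := by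
              rw [hcast5, hfj, PySem.List.slice_natCast]
            have hcast6 : f + 6 = ((j+6 : Nat) : Int) := by rw [hfj]; push_cast; ring
            have hdd6 : (L.drop (i+5)).drop (j-(i+5)+6) = L.drop (j+6) := by
              rw [List.drop_drop]; congr 1; omega
            rw [hslice, hcast6,
              ih (j+6) (if keep then res ++ (L.drop (i+5)).take (j-(i+5)) else res) (by omega),
              hdd4, hpp]
            dsimp only
            rw [hdd6]
            cases keep <;> simp
          · -- plain character branch
            rw [if_neg (fun hh => hsb (tsub.mp hh))]
            have hLi : L[i]? = some L[i] := List.getElem?_eq_getElem hi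
            have hpg : (PySem.List.pyGet? L (i : Int)).toList = [L[i]] := by
              rw [PySem.List.pyGet?_natCast, hLi]
              rfl
            have hcast1 : (i : Int) + 1 = ((i+1 : Nat) : Int) := by push_cast; ring
            rw [hpg, hcast1, ih (i+1) (res ++ [L[i]]) (by omega)]
            have hdropi : L.drop i = L[i] :: L.drop (i+1) := List.drop_eq_getElem_cons hi
            by_cases hc : L[i] = '<'
            · rw [hdropi, hc, pvBLoop_lt_cons]
              have hdropi' : L.drop i = '<' :: L.drop (i+1) := by rw [hdropi, hc]
              have hnsp : ¬ PySem.Chars.startswith (L.drop (i+1)) ['s','p','a','n'] = true :=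
                pv_not_sw ['s','p','a','n'] L i hdropi' hs
              have hncsp : ¬ PySem.Chars.startswith (L.drop (i+1)) ['/','s','p','a','n','>'] = true :=
                pv_not_sw ['/','s','p','a','n','>'] L i hdropi' hcs
              have hnsb : ¬ PySem.Chars.startswith (L.drop (i+1)) ['s','u','b','>'] = true :=
                pv_not_sw ['s','u','b','>'] L i hdropi' hsb
              rw [if_neg hnsp, if_neg hncsp, if_neg hnsb]
              simp
            · rw [hdropi, pvBLoop_cons_ne keep _ _ hc]
              simp
    · have hge : L.length ≤ i := Nat.le_of_not_lt hi
      have hiI : ¬ ((i : Int) < (L.length : Int)) := by exact_mod_cast Nat.not_lt.mpr hge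
      simp only [pvALoop]
      rw [if_neg hiI, List.drop_eq_nil_iff.mpr hge, pvBLoop_nil, List.append_nil]

-- ===== VERDICT (by name: the statement is the Claim_ definition above) =====
theorem format_text_for_excel_spec : Claim_equal_format_text_for_excel := by
  intro s k _hdom hpre
  unfold Spec_format_text_for_excel format_text_for_excel format_text_for_excel_alt
  by_cases h : s.toList = []
  · rw [if_pos h, h, pvBLoop_nil]
  · rw [if_neg h]
    have h0 := pv_main s.toList k hpre (s.toList.length + 1) 0 [] (by omega)
    simp only [Nat.cast_zero, List.drop_zero, List.nil_append] at h0
    rw [h0]
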